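-- pv_equiv track=rewrite | github.com/Stefan4472/simple-search-engine | stemmer.py | _porter_2a
-- ===== SOURCE A (Python) =====
-- VOWELS = {'a', 'e', 'i', 'o', 'u'}
--
-- def _porter_2a(term: str) -> str:
--     """Attempts to apply eed/eedly, ed/edly/ing/ingly rules,
--     and returns the resulting shortest stem."""
--     best_stem = term
--     longest_suffix_rmvd = 0
--     # Attempt eed/eedly, ed/edly/ing/ingly rules and track the
--     # longest suffix removed
--     for rule in [_p1b_eed_eedly, _p1b_ed_edly_ing_ingly]:
--         len_suffix, stemmed_term = rule(term)
--         if len_suffix > longest_suffix_rmvd: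
--             longest_suffix_rmvd = len_suffix
--             best_stem = stemmed_term
--     return best_stem
--
-- def _p1b_eed_eedly(term: str) -> (int, str):
--     """Replace 'eed', 'eedly' by 'ee' if it is in the part of the
--     word after the first non-vowel following a vowel.
--
--     Returns length of suffix removed, and resulting stem.
--     """
--     if term.endswith('eed'):
--         test_word = term[:-3]
--     elif term.endswith('eedly'):
--         test_word = term[:-5]
--     else:
--         return 0, term
--     first_vowel_index = _find_first_vowel(test_word)
--     if first_vowel_index == -1:
--         return 0, term
--     else:
--         for index in range(first_vowel_index + 1, len(test_word)):
--             if test_word[index] not in VOWELS: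
--                 # condition met
--                 return (3, term[:-1]) if term.endswith('eed') else (5, term[:-3])
--         return 0, term
--
-- def _p1b_ed_edly_ing_ingly(term: str) -> (int, str):
--     """Delete 'ed', 'edly', 'ing', 'ingly' if the preceeding word part
--     contains a vowel, and then if the word inds in 'at', 'bl', or 'iz'
--     add 'e', or if the word ends with a double letter that is not 'll',
--     'ss', or 'zz', remove the last letter, or if the word is short, add 'e'
--
--     Returns length of suffix removed, and resulting stem.
--     """
--     if term.endswith('ed'):
--         suffix_len = 2
--     elif term.endswith('edly'):
--         suffix_len = 4
--     elif term.endswith('ing'):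
--         suffix_len = 3
--     elif term.endswith('ingly'):
--         suffix_len = 5
--     else:
--         return 0, term
--
--     # Remove suffix for further tests
--     test_word = term[:-suffix_len]
--     if _contains_vowel(test_word):
--         if test_word.endswith('at') or test_word.endswith('bl') or \
--                 test_word.endswith('iz'):
--             return suffix_len, test_word + 'e'
--         elif test_word[-1] == test_word[-2] and test_word[-1] != 'l' and \
--                 test_word[-1] != 's' and test_word[-1] != 'z':
--             return suffix_len, test_word[:-1]
--         elif len(test_word) < 4:
--             return suffix_len, test_word + 'e'
--         else:
--             return suffix_len, test_word
--     else:
--         return 0, term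
--
-- def _contains_vowel(term: str) -> bool:
--     """Return whether the given string contains a vowel"""
--     return any(char in VOWELS for char in term)
--
-- def _find_first_vowel(term: str) -> int:
--     """Return index of first vowel found in the word, or -1
--     if no vowel is found"""
--     index = 0
--     for char in term:
--         if char in VOWELS:
--             return index
--         index += 1
--     return -1
-- ===== SOURCE B (Python) =====
-- VOWELS = {'a', 'e', 'i', 'o', 'u'}
--
-- def _has_vnv(s):
--     """Single pass: does s contain a vowel followed (anywhere later) by a non-vowel?"""
--     seen_vowel = False
--     for c in s:
--         if c in VOWELS:
--             seen_vowel = True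
--         elif seen_vowel:
--             return True
--     return False
--
-- def _porter_2a(term: str) -> str:
--     # eed / eedly: replace by 'ee' when the stem has a vowel followed by a non-vowel.
--     # (A positive result here always beats the ed-family rule, so we can return at once.)
--     if term.endswith('eed') or term.endswith('eedly'):
--         stem = term[:-3] if term.endswith('eed') else term[:-5]
--         if _has_vnv(stem):
--             return stem + 'ee'
--     # ed / edly / ing / ingly: strip the suffix, then fix up the stem.
--     if term.endswith('ed'):
--         stem = term[:-2]
--     elif term.endswith('edly'):
--         stem = term[:-4]
--     elif term.endswith('ing'):
--         stem = term[:-3]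
--     elif term.endswith('ingly'):
--         stem = term[:-5]
--     else:
--         return term
--     if not any(c in VOWELS for c in stem):
--         return term
--     if stem.endswith(('at', 'bl', 'iz')):
--         return stem + 'e'
--     if len(stem) >= 2 and stem[-1] == stem[-2] and stem[-1] not in 'lsz':
--         return stem[:-1]
--     if len(stem) < 4:
--         return stem + 'e'
--     return stem
-- ===== Notes on version B (the rewrite author's own statement) =====
-- stated objective: simpler
-- what changed: One direct suffix dispatch with early returns replaces A's two pair-returning rule helpers combined by a max-over-removed-suffix-length loop, and a single-pass seen-vowel scan replaces A's find-first-vowel plus index-range rescan.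
import Mathlib
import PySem

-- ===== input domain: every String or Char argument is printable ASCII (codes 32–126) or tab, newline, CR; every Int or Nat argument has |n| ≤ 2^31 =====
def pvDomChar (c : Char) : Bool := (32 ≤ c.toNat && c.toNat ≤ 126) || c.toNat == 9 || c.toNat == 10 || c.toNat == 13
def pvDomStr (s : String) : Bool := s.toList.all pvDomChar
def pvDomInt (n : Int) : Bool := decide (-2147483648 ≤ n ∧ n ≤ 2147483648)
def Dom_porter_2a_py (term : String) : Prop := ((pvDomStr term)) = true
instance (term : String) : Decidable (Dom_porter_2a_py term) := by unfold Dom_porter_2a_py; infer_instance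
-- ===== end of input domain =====

-- B replaces A's two pair-returning rule helpers plus max-over-removed-suffix loop by one direct
-- suffix dispatch with early returns, and A's find-first-vowel + index rescan by a one-pass scan
-- (objective: simpler). Equivalence is about the return value; neither version mutates its argument.

-- ===== PORT A =====

def pvVOWELS : PySem.Set Char := PySem.Set.ofList ['a', 'e', 'i', 'o', 'u']

-- _find_first_vowel: early-return for loop with a running index
def pvFindFirstVowelGo (cs : List Char) (index : Int) : Int :=
  match cs with
  | [] => -1
  | c :: rest => if pvVOWELS.contains c then index else pvFindFirstVowelGo rest (index + 1)

def pvFindFirstVowel (t : List Char) : Int := pvFindFirstVowelGo t 0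

-- _contains_vowel
def pvContainsVowel (t : List Char) : Bool := t.any (fun c => pvVOWELS.contains c)

-- the 'for index in range(first_vowel_index + 1, len(test_word))' loop of _p1b_eed_eedly
def pvEedScan (term tw : List Char) (idxs : List Int) : Int × List Char :=
  match idxs with
  | [] => (0, term)
  | i :: rest =>
      if !(pvVOWELS.contains (PySem.List.pyGetD tw i ' ')) then
        -- index always in range in Python; pyGetD's default is never used
        if PySem.Chars.endswith term ['e', 'e', 'd'] then (3, PySem.List.slice term none (some (-1)))
        else (5, PySem.List.slice term none (some (-3)))
      else pvEedScan term tw rest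

-- body of _p1b_eed_eedly after test_word is chosen
def pvEedCore (term tw : List Char) : Int × List Char :=
  let fv := pvFindFirstVowel tw
  if fv = -1 then (0, term)
  else pvEedScan term tw (PySem.List.pyRange (fv + 1) tw.length)

def pvP1bEedEedly (term : List Char) : Int × List Char :=
  if PySem.Chars.endswith term ['e', 'e', 'd'] then
    pvEedCore term (PySem.List.slice term none (some (-3)))
  else if PySem.Chars.endswith term ['e', 'e', 'd', 'l', 'y'] then
    pvEedCore term (PySem.List.slice term none (some (-5)))
  else (0, term)

-- body of _p1b_ed_edly_ing_ingly after suffix_len is chosen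
def pvP1bEdCore (term : List Char) (suffixLen : Int) : Int × List Char :=
  let tw := PySem.List.slice term none (some (-suffixLen))
  if pvContainsVowel tw then
    if PySem.Chars.endswith tw ['a', 't'] || PySem.Chars.endswith tw ['b', 'l'] ||
        PySem.Chars.endswith tw ['i', 'z'] then
      (suffixLen, tw ++ ['e'])
    else
      match PySem.List.pyGet? tw (-1), PySem.List.pyGet? tw (-2) with
      | some c1, some c2 =>
          if c1 = c2 ∧ c1 ≠ 'l' ∧ c1 ≠ 's' ∧ c1 ≠ 'z' then
            (suffixLen, PySem.List.slice tw none (some (-1)))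
          else if tw.length < 4 then (suffixLen, tw ++ ['e'])
          else (suffixLen, tw)
      | _, _ => (0, term)   -- Python raises IndexError at test_word[-2] here; excluded by Pre_
  else (0, term)

def pvP1bEd (term : List Char) : Int × List Char :=
  if PySem.Chars.endswith term ['e', 'd'] then pvP1bEdCore term 2
  else if PySem.Chars.endswith term ['e', 'd', 'l', 'y'] then pvP1bEdCore term 4
  else if PySem.Chars.endswith term ['i', 'n', 'g'] then pvP1bEdCore term 3
  else if PySem.Chars.endswith term ['i', 'n', 'g', 'l', 'y'] then pvP1bEdCore term 5
  else (0, term)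

def porter_2a_py (term : String) : String :=
  String.ofList
    (([pvP1bEedEedly, pvP1bEd].foldl
        (fun best rule =>
          let r := rule term.toList
          if r.1 > best.1 then r else best)
        (0, term.toList)).2)

-- ===== PORT B =====

def pvAltVowel (c : Char) : Bool := c = 'a' || c = 'e' || c = 'i' || c = 'o' || c = 'u'

-- _has_vnv: one pass with a seen_vowel flag
def pvAltHasVnv : List Char → Bool → Bool
  | [], _ => false
  | c :: rest, seen =>
      if pvAltVowel c then pvAltHasVnv rest true
      else if seen then true
      else pvAltHasVnv rest seen

-- the shared stem fix-up of B's ed/edly/ing/ingly part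
def pvAltFix (cs stem : List Char) : List Char :=
  if !(stem.any pvAltVowel) then cs
  else if PySem.Chars.endswith stem ['a', 't'] || PySem.Chars.endswith stem ['b', 'l'] ||
      PySem.Chars.endswith stem ['i', 'z'] then stem ++ ['e']
  else if decide (2 ≤ stem.length) &&
      (PySem.List.pyGetD stem (-1) ' ' == PySem.List.pyGetD stem (-2) ' ') &&
      !(['l', 's', 'z'].contains (PySem.List.pyGetD stem (-1) ' ')) then
    PySem.List.slice stem none (some (-1))
  else if stem.length < 4 then stem ++ ['e']
  else stem

def porter_2a_py_alt (term : String) : String :=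
  let cs := term.toList
  match
    (if PySem.Chars.endswith cs ['e', 'e', 'd'] || PySem.Chars.endswith cs ['e', 'e', 'd', 'l', 'y'] then
       let stem := if PySem.Chars.endswith cs ['e', 'e', 'd'] then PySem.List.slice cs none (some (-3))
                   else PySem.List.slice cs none (some (-5))
       if pvAltHasVnv stem false then some (stem ++ ['e', 'e']) else none
     else none) with
  | some r => String.ofList r
  | none =>
      if PySem.Chars.endswith cs ['e', 'd'] then
        String.ofList (pvAltFix cs (PySem.List.slice cs none (some (-2))))
      else if PySem.Chars.endswith cs ['e', 'd', 'l', 'y'] then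
        String.ofList (pvAltFix cs (PySem.List.slice cs none (some (-4))))
      else if PySem.Chars.endswith cs ['i', 'n', 'g'] then
        String.ofList (pvAltFix cs (PySem.List.slice cs none (some (-3))))
      else if PySem.Chars.endswith cs ['i', 'n', 'g', 'l', 'y'] then
        String.ofList (pvAltFix cs (PySem.List.slice cs none (some (-5))))
      else term

-- ===== PRECONDITION & SPEC =====

-- A raises IndexError (test_word[-2]) exactly when the term is one vowel plus one of the four
-- suffixes; Pre_ excludes exactly those terms.
def pvRaisesListB : List Char → Bool
  | [] => false
  | c :: rest =>
      ['a', 'e', 'i', 'o', 'u'].contains c &&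
        (rest == ['e', 'd'] || rest == ['e', 'd', 'l', 'y'] ||
         rest == ['i', 'n', 'g'] || rest == ['i', 'n', 'g', 'l', 'y'])

def Pre_porter_2a_py (term : String) : Prop := pvRaisesListB term.toList = false
instance (term : String) : Decidable (Pre_porter_2a_py term) := by unfold Pre_porter_2a_py; infer_instance

def pvWitness_porter_2a_py : String := "agreed"

def Spec_porter_2a_py (term : String) (out : String) : Prop := out = porter_2a_py_alt term
instance (term : String) (out : String) : Decidable (Spec_porter_2a_py term out) := by unfold Spec_porter_2a_py; infer_instance

-- ===== CLAIM (what is proved, stated in full; the proofs are below) =====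
def Claim_equal_porter_2a_py : Prop := ∀ (term : String), Dom_porter_2a_py term → Pre_porter_2a_py term → Spec_porter_2a_py term (porter_2a_py term)

-- ===== LEMMAS AND PROOFS =====

-- B's list-level body (proof helper: porter_2a_py_alt term = String.ofList (pvBList term.toList))
def pvBList (cs : List Char) : List Char :=
  match
    (if PySem.Chars.endswith cs ['e', 'e', 'd'] || PySem.Chars.endswith cs ['e', 'e', 'd', 'l', 'y'] then
       let stem := if PySem.Chars.endswith cs ['e', 'e', 'd'] then PySem.List.slice cs none (some (-3))
                   else PySem.List.slice cs none (some (-5))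
       if pvAltHasVnv stem false then some (stem ++ ['e', 'e']) else none
     else none) with
  | some r => r
  | none =>
      if PySem.Chars.endswith cs ['e', 'd'] then pvAltFix cs (PySem.List.slice cs none (some (-2)))
      else if PySem.Chars.endswith cs ['e', 'd', 'l', 'y'] then pvAltFix cs (PySem.List.slice cs none (some (-4)))
      else if PySem.Chars.endswith cs ['i', 'n', 'g'] then pvAltFix cs (PySem.List.slice cs none (some (-3)))
      else if PySem.Chars.endswith cs ['i', 'n', 'g', 'l', 'y'] then pvAltFix cs (PySem.List.slice cs none (some (-5)))
      else cs

lemma pv_alt_eq (term : String) :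
    porter_2a_py_alt term = String.ofList (pvBList term.toList) := by
  unfold porter_2a_py_alt pvBList
  cases hm : (if PySem.Chars.endswith term.toList ['e', 'e', 'd'] || PySem.Chars.endswith term.toList ['e', 'e', 'd', 'l', 'y'] then
       let stem := if PySem.Chars.endswith term.toList ['e', 'e', 'd'] then PySem.List.slice term.toList none (some (-3))
                   else PySem.List.slice term.toList none (some (-5))
       if pvAltHasVnv stem false then some (stem ++ ['e', 'e']) else none
     else none) with
  | some r => simp only [hm]
  | none =>
      simp only [hm]
      split_ifs <;> simp [String.ofList_toList]

lemma pv_contains_eq (c : Char) : pvVOWELS.contains c = pvAltVowel c := by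
  have h : (pvVOWELS : List Char) = ['a', 'e', 'i', 'o', 'u'] := by decide
  rw [PySem.Set.contains, h]
  simp [List.contains_eq_mem, pvAltVowel, Bool.or_assoc]

lemma pv_vnv_true (tw : List Char) : pvAltHasVnv tw true = tw.any (fun c => !pvAltVowel c) := by
  induction tw with
  | nil => rfl
  | cons c rest ih => by_cases h : pvAltVowel c <;> simp [pvAltHasVnv, h, ih]

lemma pv_ffvGo_cases (tw : List Char) (k : Int) :
    pvFindFirstVowelGo tw k = -1 ∨ k ≤ pvFindFirstVowelGo tw k := by
  induction tw generalizing k with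
  | nil => left; rfl
  | cons c rest ih =>
    simp only [pvFindFirstVowelGo]
    by_cases h : pvVOWELS.contains c = true
    · rw [if_pos h]; right; rfl
    · rw [if_neg h]
      rcases ih (k + 1) with h1 | h1
      · left; exact h1
      · right; omega

lemma pv_ffvGo_shift (tw : List Char) (k : Int) :
    pvFindFirstVowelGo tw k =
      if pvFindFirstVowelGo tw 0 = -1 then -1 else pvFindFirstVowelGo tw 0 + k := by
  induction tw generalizing k with
  | nil => simp [pvFindFirstVowelGo]
  | cons c rest ih =>
    simp only [pvFindFirstVowelGo]
    by_cases h : pvVOWELS.contains c = true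
    · rw [if_pos h, if_pos h]; simp
    · rw [if_neg h, if_neg h, ih (k + 1)]
      rw [show (0:Int) + 1 = 1 from rfl] at *
      rw [ih 1]
      rcases pv_ffvGo_cases rest 0 with h1 | h1 <;> by_cases h2 : pvFindFirstVowelGo rest 0 = -1 <;>
        simp [h1, h2] <;> omega

lemma pv_pyRange_nil (a b : Int) (h : b ≤ a) : PySem.List.pyRange a b = [] := by
  simp [PySem.List.pyRange]
  intro h2; omega

lemma pv_eedScan_eq (term tw : List Char) (a : Nat) :
    pvEedScan term tw (PySem.List.pyRange (a : Int) tw.length) =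
      if (tw.drop a).any (fun c => !pvAltVowel c) then
        (if PySem.Chars.endswith term ['e', 'e', 'd'] then (3, PySem.List.slice term none (some (-1)))
         else (5, PySem.List.slice term none (some (-3))))
      else (0, term) := by
  suffices h : ∀ (n a : Nat), tw.length - a ≤ n →
      pvEedScan term tw (PySem.List.pyRange (a : Int) tw.length) =
        if (tw.drop a).any (fun c => !pvAltVowel c) then
          (if PySem.Chars.endswith term ['e', 'e', 'd'] then (3, PySem.List.slice term none (some (-1)))
           else (5, PySem.List.slice term none (some (-3))))
        else (0, term) by
    exact h tw.length a (by omega)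
  intro n
  induction n with
  | zero =>
    intro a ha
    rw [pv_pyRange_nil _ _ (by exact_mod_cast (by omega : tw.length ≤ a))]
    rw [List.drop_eq_nil_of_le (by omega)]
    simp [pvEedScan]
  | succ n ih =>
    intro a ha
    by_cases hlt : a < tw.length
    · rw [PySem.List.pyRange_one_cons (by exact_mod_cast hlt)]
      rw [List.drop_eq_getElem_cons hlt]
      simp only [pvEedScan]
      rw [show ((a : Int) + 1) = ((a + 1 : Nat) : Int) by push_cast; ring]
      rw [PySem.List.pyGetD_natCast, List.getD_eq_getElem _ _ hlt, pv_contains_eq]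
      by_cases hv : pvAltVowel tw[a] = true
      · rw [ih (a + 1) (by omega)]
        simp only [hv]
        have hiff : (∃ x ∈ List.drop (a + 1) tw, pvAltVowel x = false) ↔
            (∃ x ∈ List.drop a tw, pvAltVowel x = false) := by
          rw [List.drop_eq_getElem_cons hlt]
          constructor
          · rintro ⟨x, hx, hfx⟩; exact ⟨x, List.mem_cons_of_mem _ hx, hfx⟩
          · rintro ⟨x, hx, hfx⟩
            rcases List.mem_cons.mp hx with rfl | hx'
            · rw [hv] at hfx; cases hfx
            · exact ⟨x, hx', hfx⟩
        simp [hiff]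
      · simp only [Bool.not_eq_true] at hv
        simp [hv]
        intro hall
        have := hall tw[a] (by rw [List.drop_eq_getElem_cons hlt]; exact List.mem_cons_self)
        simp [hv] at this
    · rw [pv_pyRange_nil _ _ (by exact_mod_cast Nat.le_of_not_lt hlt)]
      rw [List.drop_eq_nil_of_le (Nat.le_of_not_lt hlt)]
      simp [pvEedScan]

lemma pv_vnv_char (tw : List Char) :
    pvAltHasVnv tw false =
      if pvFindFirstVowel tw = -1 then false
      else (tw.drop ((pvFindFirstVowel tw).toNat + 1)).any (fun c => !pvAltVowel c) := by
  induction tw with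
  | nil => simp [pvAltHasVnv, pvFindFirstVowel, pvFindFirstVowelGo]
  | cons c rest ih =>
    simp only [pvAltHasVnv, pvFindFirstVowel, pvFindFirstVowelGo, pv_contains_eq]
    by_cases h : pvAltVowel c = true
    · simp [h, pv_vnv_true]
    · simp only [h, if_false, Bool.false_eq_true]
      rw [ih]
      rw [show (0:Int) + 1 = 1 from rfl, pv_ffvGo_shift rest 1]
      rcases pv_ffvGo_cases rest 0 with h1 | h1
      · simp [pvFindFirstVowel, h1]
      · have h2 : ¬ (pvFindFirstVowelGo rest 0 = -1) := by omega
        have h3 : ¬ (pvFindFirstVowelGo rest 0 + 1 = -1) := by omega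
        simp only [pvFindFirstVowel, h2, h3, ite_false]
        have h4 : (pvFindFirstVowelGo rest 0 + 1).toNat + 1 = ((pvFindFirstVowelGo rest 0).toNat + 1) + 1 := by omega
        rw [h4, List.drop_succ_cons]

lemma pv_eedCore_eq (term tw : List Char) :
    pvEedCore term tw =
      if pvAltHasVnv tw false then
        (if PySem.Chars.endswith term ['e', 'e', 'd'] then (3, PySem.List.slice term none (some (-1)))
         else (5, PySem.List.slice term none (some (-3))))
      else (0, term) := by
  unfold pvEedCore
  rw [pv_vnv_char]
  by_cases h : pvFindFirstVowel tw = -1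
  · simp [h]
  · have h0 : 0 ≤ pvFindFirstVowel tw := by
      rcases pv_ffvGo_cases tw 0 with h1 | h1
      · exact absurd h1 h
      · exact h1
    have hcast : pvFindFirstVowel tw + 1 = (((pvFindFirstVowel tw).toNat + 1 : Nat) : Int) := by omega
    simp only [h, ite_false]
    rw [hcast, pv_eedScan_eq]

lemma pv_pyGet_neg_one (xs : List Char) (h : 1 ≤ xs.length) :
    PySem.List.pyGet? xs (-1) = some xs[xs.length - 1] := by
  simp [PySem.List.pyGet?, PySem.List.pyIdx?]
  rw [if_pos h]
  simp [List.getElem?_eq_getElem (show xs.length - 1 < xs.length by omega)]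

lemma pv_pyGet_neg_two (xs : List Char) (h : 2 ≤ xs.length) :
    PySem.List.pyGet? xs (-2) = some xs[xs.length - 2] := by
  simp [PySem.List.pyGet?, PySem.List.pyIdx?]
  rw [if_pos h]
  simp [List.getElem?_eq_getElem (show xs.length - 2 < xs.length by omega)]

lemma pv_edCore_fst (cs : List Char) (k : Int) :
    (pvP1bEdCore cs k).1 = 0 ∨ (pvP1bEdCore cs k).1 = k := by
  simp only [pvP1bEdCore]
  split_ifs <;> (try split) <;> (try split_ifs) <;> simp

lemma pv_edCore_eq (cs st : List Char) (k : Int)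
    (hst : PySem.List.slice cs none (some (-k)) = st)
    (h1 : ¬ (st.any (fun c => pvAltVowel c) = true ∧ st.length = 1)) :
    pvP1bEdCore cs k =
      if st.any (fun c => pvAltVowel c) then (k, pvAltFix cs st) else (0, cs) := by
  simp only [pvP1bEdCore, pvAltFix]
  rw [hst]
  simp only [pvContainsVowel]
  simp only [funext fun c => pv_contains_eq c]
  by_cases hv : st.any (fun c => pvAltVowel c) = true
  · simp only [hv, if_true, Bool.not_true, Bool.false_eq_true, if_false]
    by_cases hat : (PySem.Chars.endswith st ['a', 't'] || PySem.Chars.endswith st ['b', 'l'] ||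
        PySem.Chars.endswith st ['i', 'z']) = true
    · simp [hat]
    · simp only [hat, if_false, Bool.false_eq_true]
      have hlen1 : 1 ≤ st.length := by
        rcases List.any_eq_true.mp hv with ⟨x, hx, _⟩
        cases st
        · cases hx
        · simp
      by_cases hlen : 2 ≤ st.length
      · rw [pv_pyGet_neg_one st (by omega), pv_pyGet_neg_two st hlen]
        have hd : PySem.List.pyGetD st (-1) ' ' = st[st.length - 1] := by
          simp [PySem.List.pyGetD, pv_pyGet_neg_one st (by omega)]
        have hd2 : PySem.List.pyGetD st (-2) ' ' = st[st.length - 2] := by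
          simp [PySem.List.pyGetD, pv_pyGet_neg_two st hlen]
        simp only [hd, hd2]
        by_cases hc : st[st.length - 1] = st[st.length - 2] ∧ st[st.length - 1] ≠ 'l' ∧
            st[st.length - 1] ≠ 's' ∧ st[st.length - 1] ≠ 'z'
        · rw [if_pos hc]
          rw [if_pos (by
            obtain ⟨heq, h1', h2', h3'⟩ := hc
            simp only [Bool.and_eq_true, decide_eq_true_eq, beq_iff_eq, Bool.not_eq_true',
              List.contains_eq_mem, decide_eq_false_iff_not]
            refine ⟨⟨hlen, heq⟩, ?_⟩
            simp only [List.mem_cons, List.not_mem_nil, or_false]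
            push Not
            exact ⟨h1', h2', h3'⟩)]
        · rw [if_neg hc]
          have hbc : (decide (2 ≤ st.length) && (st[st.length - 1] == st[st.length - 2]) &&
              !(['l', 's', 'z'].contains st[st.length - 1])) = false := by
            by_cases heq : st[st.length - 1] = st[st.length - 2]
            · by_cases hm : st[st.length - 1] ∈ ['l', 's', 'z']
              · simp [hm, List.contains_eq_mem]
              · exfalso
                apply hc
                refine ⟨heq, ?_, ?_, ?_⟩ <;> intro h' <;> apply hm <;> simp [h']
            · simp [heq]
          rw [hbc]
          simp only [Bool.false_eq_true, if_false]
          by_cases hl4 : st.length < 4 <;> simp [hl4]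
      · exact absurd ⟨hv, by omega⟩ h1
  · simp [hv]

lemma pv_p1bEd_fst (cs : List Char) :
    (pvP1bEd cs).1 = 0 ∨ (pvP1bEd cs).1 = 2 ∨ (pvP1bEd cs).1 = 3 ∨
      (pvP1bEd cs).1 = 4 ∨ (pvP1bEd cs).1 = 5 := by
  unfold pvP1bEd
  split_ifs
  · rcases pv_edCore_fst cs 2 with h | h <;> omega
  · rcases pv_edCore_fst cs 4 with h | h <;> omega
  · rcases pv_edCore_fst cs 3 with h | h <;> omega
  · rcases pv_edCore_fst cs 5 with h | h <;> omega
  · simp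

lemma pv_branch (cs st : List Char) (k : Int) (hk : 0 < k)
    (hst : PySem.List.slice cs none (some (-k)) = st)
    (h1 : ¬ (st.any (fun c => pvAltVowel c) = true ∧ st.length = 1)) :
    (if (pvP1bEdCore cs k).1 > 0 then (pvP1bEdCore cs k).2 else cs) = pvAltFix cs st := by
  rw [pv_edCore_eq cs st k hst h1]
  by_cases hv : st.any (fun c => pvAltVowel c) = true
  · simp only [hv, if_true]
    rw [if_pos (by simpa using hk)]
  · simp only [hv, Bool.false_eq_true, if_false]
    rw [if_neg (by simp)]
    simp [pvAltFix, hv]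

lemma pv_dispatch (cs : List Char) (hp : pvRaisesListB cs = false) :
    (if (pvP1bEd cs).1 > 0 then (pvP1bEd cs).2 else cs) =
      (if PySem.Chars.endswith cs ['e', 'd'] then pvAltFix cs (PySem.List.slice cs none (some (-2)))
       else if PySem.Chars.endswith cs ['e', 'd', 'l', 'y'] then pvAltFix cs (PySem.List.slice cs none (some (-4)))
       else if PySem.Chars.endswith cs ['i', 'n', 'g'] then pvAltFix cs (PySem.List.slice cs none (some (-3)))
       else if PySem.Chars.endswith cs ['i', 'n', 'g', 'l', 'y'] then pvAltFix cs (PySem.List.slice cs none (some (-5)))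
       else cs) := by
  unfold pvP1bEd
  by_cases hed : PySem.Chars.endswith cs ['e', 'd'] = true
  · simp only [hed, if_true]
    obtain ⟨st, rfl⟩ := (PySem.Chars.endswith_iff _ _).mp hed
    have hst : PySem.List.slice (st ++ ['e', 'd']) none (some (-2)) = st := by
      rw [PySem.List.slice_to_neg_ofNat _ 2 (by omega)]; simp
    rw [hst]
    apply pv_branch _ _ _ (by omega) hst
    rintro ⟨hv, hl⟩
    obtain ⟨c, rfl⟩ := List.length_eq_one_iff.mp hl
    simp only [List.any_cons, List.any_nil, Bool.or_false] at hv
    simp [pvRaisesListB] at hp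
    simp only [pvAltVowel, Bool.or_eq_true, decide_eq_true_eq] at hv
    tauto
  · simp only [hed, Bool.false_eq_true, if_false]
    by_cases hedly : PySem.Chars.endswith cs ['e', 'd', 'l', 'y'] = true
    · simp only [hedly, if_true]
      obtain ⟨st, rfl⟩ := (PySem.Chars.endswith_iff _ _).mp hedly
      have hst : PySem.List.slice (st ++ ['e', 'd', 'l', 'y']) none (some (-4)) = st := by
        rw [PySem.List.slice_to_neg_ofNat _ 4 (by omega)]; simp
      rw [hst]
      apply pv_branch _ _ _ (by omega) hst
      rintro ⟨hv, hl⟩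
      obtain ⟨c, rfl⟩ := List.length_eq_one_iff.mp hl
      simp only [List.any_cons, List.any_nil, Bool.or_false] at hv
      simp [pvRaisesListB] at hp
      simp only [pvAltVowel, Bool.or_eq_true, decide_eq_true_eq] at hv
      tauto
    · simp only [hedly, Bool.false_eq_true, if_false]
      by_cases hing : PySem.Chars.endswith cs ['i', 'n', 'g'] = true
      · simp only [hing, if_true]
        obtain ⟨st, rfl⟩ := (PySem.Chars.endswith_iff _ _).mp hing
        have hst : PySem.List.slice (st ++ ['i', 'n', 'g']) none (some (-3)) = st := by
          rw [PySem.List.slice_to_neg_ofNat _ 3 (by omega)]; simp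
        rw [hst]
        apply pv_branch _ _ _ (by omega) hst
        rintro ⟨hv, hl⟩
        obtain ⟨c, rfl⟩ := List.length_eq_one_iff.mp hl
        simp only [List.any_cons, List.any_nil, Bool.or_false] at hv
        simp [pvRaisesListB] at hp
        simp only [pvAltVowel, Bool.or_eq_true, decide_eq_true_eq] at hv
        tauto
      · simp only [hing, Bool.false_eq_true, if_false]
        by_cases hingly : PySem.Chars.endswith cs ['i', 'n', 'g', 'l', 'y'] = true
        · simp only [hingly, if_true]
          obtain ⟨st, rfl⟩ := (PySem.Chars.endswith_iff _ _).mp hingly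
          have hst : PySem.List.slice (st ++ ['i', 'n', 'g', 'l', 'y']) none (some (-5)) = st := by
            rw [PySem.List.slice_to_neg_ofNat _ 5 (by omega)]; simp
          rw [hst]
          apply pv_branch _ _ _ (by omega) hst
          rintro ⟨hv, hl⟩
          obtain ⟨c, rfl⟩ := List.length_eq_one_iff.mp hl
          simp only [List.any_cons, List.any_nil, Bool.or_false] at hv
          simp [pvRaisesListB] at hp
          simp only [pvAltVowel, Bool.or_eq_true, decide_eq_true_eq] at hv
          tauto
        · simp only [hingly, Bool.false_eq_true, if_false]
          simp

lemma pv_main (cs : List Char) (hp : pvRaisesListB cs = false) :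
    ([pvP1bEedEedly, pvP1bEd].foldl
        (fun best rule =>
          let r := rule cs
          if r.1 > best.1 then r else best)
        (0, cs)).2 = pvBList cs := by
  simp only [List.foldl]
  by_cases he3 : PySem.Chars.endswith cs ['e', 'e', 'd'] = true
  · obtain ⟨st, rfl⟩ := (PySem.Chars.endswith_iff _ _).mp he3
    have hsl3 : PySem.List.slice (st ++ ['e', 'e', 'd']) none (some (-3)) = st := by
      rw [PySem.List.slice_to_neg_ofNat _ 3 (by omega)]; simp
    have hr1 : pvP1bEedEedly (st ++ ['e', 'e', 'd']) =
        if pvAltHasVnv st false then (3, PySem.List.slice (st ++ ['e', 'e', 'd']) none (some (-1)))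
        else (0, st ++ ['e', 'e', 'd']) := by
      unfold pvP1bEedEedly
      rw [if_pos he3, hsl3, pv_eedCore_eq]
      simp only [he3, if_true]
    by_cases hv : pvAltHasVnv st false = true
    · have hsl1 : PySem.List.slice (st ++ ['e', 'e', 'd']) none (some (-1)) = st ++ ['e', 'e'] := by
        rw [PySem.List.slice_to_neg_one]
        simp
      have hed : PySem.Chars.endswith (st ++ ['e', 'e', 'd']) ['e', 'd'] = true :=
        (PySem.Chars.endswith_iff _ _).mpr ⟨st ++ ['e'], by simp⟩
      have hr2 : pvP1bEd (st ++ ['e', 'e', 'd']) = pvP1bEdCore (st ++ ['e', 'e', 'd']) 2 := by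
        unfold pvP1bEd; rw [if_pos hed]
      have h2f : (pvP1bEd (st ++ ['e', 'e', 'd'])).1 = 0 ∨ (pvP1bEd (st ++ ['e', 'e', 'd'])).1 = 2 := by
        rw [hr2]; exact pv_edCore_fst _ 2
      rcases h2f with hf | hf <;>
        norm_num [hr1, hv, hf, hsl1, pvBList, he3, hsl3]
    · have hd := pv_dispatch (st ++ ['e', 'e', 'd']) hp
      by_cases hgt : (pvP1bEd (st ++ ['e', 'e', 'd'])).1 > 0
      · simp only [hgt, if_true] at hd
        norm_num [hr1, hv, hgt, hd, pvBList, he3, hsl3]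
      · simp only [hgt, if_false] at hd
        norm_num [hr1, hv, hgt]
        conv_lhs => rw [hd]
        norm_num [pvBList, he3, hsl3, hv]
  · by_cases he5 : PySem.Chars.endswith cs ['e', 'e', 'd', 'l', 'y'] = true
    · obtain ⟨st, rfl⟩ := (PySem.Chars.endswith_iff _ _).mp he5
      have hsl5 : PySem.List.slice (st ++ ['e', 'e', 'd', 'l', 'y']) none (some (-5)) = st := by
        rw [PySem.List.slice_to_neg_ofNat _ 5 (by omega)]; simp
      have hr1 : pvP1bEedEedly (st ++ ['e', 'e', 'd', 'l', 'y']) =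
          if pvAltHasVnv st false then (5, PySem.List.slice (st ++ ['e', 'e', 'd', 'l', 'y']) none (some (-3)))
          else (0, st ++ ['e', 'e', 'd', 'l', 'y']) := by
        unfold pvP1bEedEedly
        rw [if_neg (by simp [he3]), if_pos he5, hsl5, pv_eedCore_eq]
        simp only [he3, Bool.false_eq_true, if_false]
      by_cases hv : pvAltHasVnv st false = true
      · have hsl3' : PySem.List.slice (st ++ ['e', 'e', 'd', 'l', 'y']) none (some (-3)) = st ++ ['e', 'e'] := by
          rw [PySem.List.slice_to_neg_ofNat _ 3 (by omega)]
          rw [show (st ++ ['e', 'e', 'd', 'l', 'y']).length - 3 = st.length + 2 by simp]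
          rw [List.take_length_add_append]
          simp
        rcases pv_p1bEd_fst (st ++ ['e', 'e', 'd', 'l', 'y']) with hf | hf | hf | hf | hf <;>
          norm_num [hr1, hv, hf, hsl3', pvBList, he3, he5, hsl5]
      · have hd := pv_dispatch (st ++ ['e', 'e', 'd', 'l', 'y']) hp
        by_cases hgt : (pvP1bEd (st ++ ['e', 'e', 'd', 'l', 'y'])).1 > 0
        · simp only [hgt, if_true] at hd
          norm_num [hr1, hv, hgt, hd, pvBList, he3, he5, hsl5]
        · simp only [hgt, if_false] at hd
          norm_num [hr1, hv, hgt]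
          conv_lhs => rw [hd]
          norm_num [pvBList, he3, he5, hsl5, hv]
    · have hr1 : pvP1bEedEedly cs = (0, cs) := by
        unfold pvP1bEedEedly
        rw [if_neg (by simp [he3]), if_neg (by simp [he5])]
      have hd := pv_dispatch cs hp
      by_cases hgt : (pvP1bEd cs).1 > 0
      · simp only [hgt, if_true] at hd
        norm_num [hr1, hgt, hd, pvBList, he3, he5]
      · simp only [hgt, if_false] at hd
        norm_num [hr1, hgt, pvBList, he3, he5, ← hd]

-- ===== VERDICT (by name: the statement is the Claim_ definition above) =====
theorem porter_2a_py_spec : Claim_equal_porter_2a_py := by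
  intro term _ hpre
  unfold Spec_porter_2a_py
  rw [pv_alt_eq]
  unfold porter_2a_py
  rw [pv_main term.toList hpre]
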